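-- pv_equiv track=rewrite | github.com/yassataiseer/competitive-programming | dmoj/Nadan.py | solve
-- ===== SOURCE A (Python) =====
-- def solve(money,people):
--     prev_amount = 0
--     numbers = []
--     for i in range(people):
--         if i+1 == people:
--             numbers.append(money)
--         else:
--             prev_amount += 1
--             money -= 1
--             numbers.append(prev_amount)
--     return numbers
-- ===== SOURCE B (Python) =====
-- def solve(money, people):
--     if people <= 0:
--         return []
--     # build the shares back-to-front: leftover first, then counts descending
--     shares = [money - (people - 1)]
--     k = people - 1
--     while k >= 1:
--         shares.append(k)
--         k -= 1
--     shares.reverse()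
--     return shares
-- ===== Notes on version B (the rewrite author's own statement) =====
-- stated objective: alternative
-- what changed: B builds the share list back-to-front: it starts from the closed-form leftover share money-(people-1), appends the counts people-1 down to 1 with a countdown loop, and reverses, instead of A's forward loop with a running accumulator, decrementing money and a last-index branch.
import Mathlib
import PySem

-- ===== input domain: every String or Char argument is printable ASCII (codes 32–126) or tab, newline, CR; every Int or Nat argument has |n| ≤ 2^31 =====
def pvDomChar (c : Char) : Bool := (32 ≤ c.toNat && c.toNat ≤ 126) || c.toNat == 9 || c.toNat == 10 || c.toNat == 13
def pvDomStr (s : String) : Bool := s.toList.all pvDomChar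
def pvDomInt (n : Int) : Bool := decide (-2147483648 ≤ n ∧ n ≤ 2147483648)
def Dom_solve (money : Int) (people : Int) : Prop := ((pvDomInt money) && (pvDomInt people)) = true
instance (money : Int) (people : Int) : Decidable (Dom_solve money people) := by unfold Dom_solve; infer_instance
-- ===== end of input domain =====

-- B builds the share list back-to-front (leftover share first, then counts descending, then
-- reverse) instead of A's forward loop with accumulator/decrement and a last-index branch.

-- ===== PORT A =====
-- state: (prev_amount, money, numbers)
def solveStep (people : Int) (st : Int × Int × List Int) (i : Int) : Int × Int × List Int :=
  if i + 1 == people then (st.1, st.2.1, st.2.2 ++ [st.2.1])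
  else (st.1 + 1, st.2.1 - 1, st.2.2 ++ [st.1 + 1])

def solve (money : Int) (people : Int) : List Int :=
  ((PySem.List.pyRange 0 people 1).foldl (solveStep people) (0, money, [])).2.2

-- ===== PORT B =====
-- the 'while k >= 1' countdown loop; fuel is k.toNat, k carried as Int as in the Python
def altLoop : Nat → Int → List Int → List Int
  | 0, _, out => out
  | n + 1, k, out => altLoop n (k - 1) (out ++ [k])

def solve_alt (money : Int) (people : Int) : List Int :=
  if people ≤ 0 then []
  else (altLoop (people - 1).toNat (people - 1) [money - (people - 1)]).reverse

-- ===== PRECONDITION & SPEC =====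
def Spec_solve (money : Int) (people : Int) (out : List Int) : Prop := out = solve_alt money people
instance (money : Int) (people : Int) (out : List Int) : Decidable (Spec_solve money people out) := by unfold Spec_solve; infer_instance

-- ===== CLAIM =====
def Claim_equal_solve : Prop := ∀ (money : Int) (people : Int), Dom_solve money people → Spec_solve money people (solve money people)

-- ===== LEMMAS AND PROOFS =====

-- descending list [n, n-1, …, 1]
def descInt : Nat → List Int
  | 0 => []
  | n + 1 => ((n : Int) + 1) :: descInt n

theorem altLoop_desc (n : Nat) (out : List Int) :
    altLoop n (n : Int) out = out ++ descInt n := by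
  induction n generalizing out with
  | zero => simp [altLoop, descInt]
  | succ m ih =>
      have h1 : ((m + 1 : Nat) : Int) - 1 = (m : Int) := by push_cast; ring
      simp only [altLoop, h1, ih]
      simp [descInt]

theorem descInt_reverse (n : Nat) :
    (descInt n).reverse = PySem.List.pyRange 1 ((n : Int) + 1) 1 := by
  induction n with
  | zero => simp [descInt, PySem.List.pyRange_one_eq_nil]
  | succ m ih =>
      have hsplit : PySem.List.pyRange 1 ((m : Int) + 1 + 1) 1
          = PySem.List.pyRange 1 ((m : Int) + 1) 1 ++ [(m : Int) + 1] :=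
        PySem.List.pyRange_one_succ_right (by omega)
      push_cast
      rw [hsplit, ← ih]
      simp [descInt]

-- Loop invariant for A: after m iterations (all below the last index) the state is
-- (m, money - m, [1, …, m]).
theorem solve_loop_inv (money p : Int) (m : Nat) (h : (m : Int) ≤ p - 1) :
    (PySem.List.pyRange 0 (m : Int) 1).foldl (solveStep p) (0, money, [])
      = ((m : Int), money - m, PySem.List.pyRange 1 ((m : Int) + 1) 1) := by
  induction m with
  | zero =>
      simp [PySem.List.pyRange_one_eq_nil]
  | succ n ih =>
      have hn : (n : Int) ≤ p - 1 := by push_cast at h ⊢; omega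
      have hsplit : PySem.List.pyRange 0 ((n : Int) + 1) 1
          = PySem.List.pyRange 0 (n : Int) 1 ++ [(n : Int)] :=
        PySem.List.pyRange_one_succ_right (by positivity)
      have hsplit2 : PySem.List.pyRange 1 ((n : Int) + 1 + 1) 1
          = PySem.List.pyRange 1 ((n : Int) + 1) 1 ++ [(n : Int) + 1] :=
        PySem.List.pyRange_one_succ_right (by omega)
      have hne : ((n : Int) + 1 == p) = false := by
        simp only [beq_eq_false_iff_ne, ne_eq]
        push_cast at h; omega
      push_cast
      rw [hsplit, List.foldl_append, ih hn]
      simp [solveStep, hne, hsplit2]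
      ring

theorem solve_eq_alt (money p : Int) : solve money p = solve_alt money p := by
  by_cases hp : p ≤ 0
  · simp [solve, solve_alt, hp, PySem.List.pyRange_one_eq_nil (by omega : p ≤ 0)]
  · push Not at hp
    set n : Nat := (p - 1).toNat with hn
    have hpn : p = (n : Int) + 1 := by simp [hn]; omega
    have hsplit : PySem.List.pyRange 0 p 1
        = PySem.List.pyRange 0 (n : Int) 1 ++ [(n : Int)] := by
      rw [hpn]; exact PySem.List.pyRange_one_succ_right (by positivity)
    have hinv := solve_loop_inv money p n (by omega)
    have hlast : ((n : Int) + 1 == p) = true := by simp [hpn]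
    have hB : solve_alt money p
        = PySem.List.pyRange 1 ((n : Int) + 1) 1 ++ [money - n] := by
      have h2 : p - 1 = (n : Int) := by omega
      simp only [solve_alt, if_neg (by omega : ¬ p ≤ 0), h2, Int.toNat_natCast, altLoop_desc]
      rw [List.reverse_append, descInt_reverse]
      simp
    simp only [solve, hsplit, List.foldl_append, hinv, List.foldl_cons,
      List.foldl_nil, solveStep, hlast, if_true, hB]

-- ===== VERDICT =====
theorem solve_spec : Claim_equal_solve := by
  intro money people _
  exact solve_eq_alt money people
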